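-- pv_equiv track=rewrite | github.com/Jefemaestro33/barrington-mixing | extensions/simplex-universality/exact_proof_singular_values.py | get_adjacent_pairs
-- ===== SOURCE A (Python) =====
-- def get_all_transpositions(n):
--     """All transpositions (a,b) with 0 <= a < b < n."""
--     return [(a, b) for a in range(n) for b in range(a+1, n)]
--
-- def are_adjacent(t1, t2):
--     """Two transpositions are adjacent if they share exactly 1 element."""
--     s1 = {t1[0], t1[1]}
--     s2 = {t2[0], t2[1]}
--     return len(s1 & s2) == 1
--
-- def get_adjacent_pairs(n):
--     """All ordered pairs (sigma, tau) of adjacent transpositions."""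
--     transpositions = get_all_transpositions(n)
--     pairs = []
--     for i, t1 in enumerate(transpositions):
--         for j, t2 in enumerate(transpositions):
--             if i != j and are_adjacent(t1, t2):
--                 pairs.append((t1, t2))
--     return pairs
-- ===== SOURCE B (Python) =====
-- def get_adjacent_pairs(n):
--     """All ordered pairs (sigma, tau) of adjacent transpositions."""
--     pairs = []
--     for a in range(n):
--         for b in range(a + 1, n):
--             t1 = (a, b)
--             # adjacent partners of (a,b), emitted directly in lexicographic order
--             for x in range(a):
--                 pairs.append((t1, (x, a)))
--                 pairs.append((t1, (x, b)))
--             for y in range(a + 1, n):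
--                 if y != b:
--                     pairs.append((t1, (a, y)))
--             for x in range(a + 1, b):
--                 pairs.append((t1, (x, b)))
--             for y in range(b + 1, n):
--                 pairs.append((t1, (b, y)))
--     return pairs
-- ===== Notes on version B (the rewrite author's own statement) =====
-- stated objective: faster
-- what changed: Instead of testing all O(n^4) ordered pairs of transpositions for adjacency, B enumerates, for each transposition (a,b), exactly its adjacent partners directly in lexicographic order via four range loops, with no adjacency test at all.
import Mathlib
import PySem

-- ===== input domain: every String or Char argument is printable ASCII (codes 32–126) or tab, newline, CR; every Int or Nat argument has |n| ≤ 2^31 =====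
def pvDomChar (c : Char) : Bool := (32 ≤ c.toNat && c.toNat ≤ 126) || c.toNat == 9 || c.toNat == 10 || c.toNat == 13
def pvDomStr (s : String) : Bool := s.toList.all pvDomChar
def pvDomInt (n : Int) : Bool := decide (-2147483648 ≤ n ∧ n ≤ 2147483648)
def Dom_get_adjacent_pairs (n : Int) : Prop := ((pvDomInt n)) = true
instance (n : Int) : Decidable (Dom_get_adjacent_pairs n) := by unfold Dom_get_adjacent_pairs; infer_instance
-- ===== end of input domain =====

-- B replaces A's all-pairs adjacency scan by emitting, for each transposition (a,b),
-- exactly its adjacent partners directly in lexicographic order (objective: faster).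


-- ===== PORT A =====
-- [(a, b) for a in range(n) for b in range(a+1, n)]
def get_all_transpositions (n : Int) : List (Int × Int) :=
  (PySem.List.pyRange 0 n 1).flatMap (fun a =>
    (PySem.List.pyRange (a + 1) n 1).map (fun b => (a, b)))

-- len({t1[0],t1[1]} & {t2[0],t2[1]}) == 1
def are_adjacent (t1 t2 : Int × Int) : Bool :=
  let s1 : PySem.Set Int := PySem.Set.ofList [t1.1, t1.2]
  let s2 : PySem.Set Int := PySem.Set.ofList [t2.1, t2.2]
  PySem.Set.len (PySem.Set.inter s1 s2) == 1

def get_adjacent_pairs (n : Int) : List ((Int × Int) × (Int × Int)) :=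
  let transpositions := get_all_transpositions n
  (PySem.List.enumerate transpositions 0).foldl (fun pairs p =>
    (PySem.List.enumerate transpositions 0).foldl (fun pairs q =>
      if p.1 ≠ q.1 ∧ are_adjacent p.2 q.2 then pairs ++ [(p.2, q.2)] else pairs)
      pairs) []

-- ===== PORT B =====
def get_adjacent_pairs_alt (n : Int) : List ((Int × Int) × (Int × Int)) :=
  (PySem.List.pyRange 0 n 1).foldl (fun pairs a =>
    (PySem.List.pyRange (a + 1) n 1).foldl (fun pairs b =>
      let t1 := (a, b)
      let pairs := (PySem.List.pyRange 0 a 1).foldl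
        (fun pairs x => pairs ++ [(t1, (x, a))] ++ [(t1, (x, b))]) pairs
      let pairs := (PySem.List.pyRange (a + 1) n 1).foldl
        (fun pairs y => if y ≠ b then pairs ++ [(t1, (a, y))] else pairs) pairs
      let pairs := (PySem.List.pyRange (a + 1) b 1).foldl
        (fun pairs x => pairs ++ [(t1, (x, b))]) pairs
      (PySem.List.pyRange (b + 1) n 1).foldl
        (fun pairs y => pairs ++ [(t1, (b, y))]) pairs) pairs) []

-- ===== PRECONDITION & SPEC =====
def Spec_get_adjacent_pairs (n : Int) (out : List ((Int × Int) × (Int × Int))) : Prop := out = get_adjacent_pairs_alt n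
instance (n : Int) (out : List ((Int × Int) × (Int × Int))) : Decidable (Spec_get_adjacent_pairs n out) := by unfold Spec_get_adjacent_pairs; infer_instance

-- ===== CLAIM (what is proved, stated in full; the proofs are below) =====
def Claim_equal_get_adjacent_pairs : Prop := ∀ (n : Int), Dom_get_adjacent_pairs n → Spec_get_adjacent_pairs n (get_adjacent_pairs n)

-- ===== LEMMAS AND PROOFS =====

-- the four lexicographic blocks B emits for a fixed transposition (a, b)
def adjSeg (n a b : Int) : List ((Int × Int) × (Int × Int)) :=
  (PySem.List.pyRange 0 a 1).flatMap (fun x => [((a, b), (x, a)), ((a, b), (x, b))])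
  ++ ((PySem.List.pyRange (a + 1) n 1).filter (fun y => decide (y ≠ b))).map (fun y => ((a, b), (a, y)))
  ++ (PySem.List.pyRange (a + 1) b 1).map (fun x => ((a, b), (x, b)))
  ++ (PySem.List.pyRange (b + 1) n 1).map (fun y => ((a, b), (b, y)))

theorem B_normal (n : Int) :
    get_adjacent_pairs_alt n =
      (PySem.List.pyRange 0 n 1).flatMap (fun a =>
        (PySem.List.pyRange (a + 1) n 1).flatMap (fun b => adjSeg n a b)) := by
  unfold get_adjacent_pairs_alt
  simp only [List.append_assoc, List.singleton_append, PySem.List.foldl_append_ite,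
    PySem.List.foldl_append_singleton_eq_map, PySem.List.foldl_append_eq_flatMap, adjSeg,
    List.nil_append]

theorem enumerate_filter_map {α β : Type} (xs : List α) (s : Int) (pr : α → Bool) (g : α → β) :
    ((PySem.List.enumerate xs s).filter (fun q => pr q.2)).map (fun q => g q.2)
      = (xs.filter pr).map g := by
  induction xs generalizing s with
  | nil => simp [PySem.List.enumerate_nil]
  | cons x t ih =>
    simp only [PySem.List.enumerate_cons, List.filter_cons]
    split <;> simp_all

theorem mem_transpositions {n : Int} {t : Int × Int} (h : t ∈ get_all_transpositions n) :
    t.1 < t.2 := by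
  simp only [get_all_transpositions, List.mem_flatMap, List.mem_map] at h
  obtain ⟨a, ha, b, hb, rfl⟩ := h
  exact (PySem.List.mem_pyRange_one.1 hb).1.trans_lt' (by omega)

theorem adj_iff' (a b x y : Int) (hab : a ≠ b) (hxy : x ≠ y) :
    are_adjacent (a, b) (x, y) = true ↔ ((a = x ∨ a = y) ↔ ¬(b = x ∨ b = y)) := by
  have h1 : PySem.Set.ofList [a, b] = [a, b] :=
    PySem.Set.ofList_eq_self_of_nodup _ (by simp [hab])
  have h2 : PySem.Set.ofList [x, y] = [x, y] :=
    PySem.Set.ofList_eq_self_of_nodup _ (by simp [hxy])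
  simp only [are_adjacent, h1, h2]
  by_cases hax : a = x <;> by_cases hay : a = y <;> by_cases hbx : b = x <;> by_cases hby : b = y <;>
    simp_all [PySem.Set.inter, PySem.Set.len, PySem.Set.contains, List.filter]

theorem adj_self {t : Int × Int} (h : t.1 ≠ t.2) : are_adjacent t t = false := by
  obtain ⟨a, b⟩ := t
  have := adj_iff' a b a b h h
  cases hr : are_adjacent (a, b) (a, b) <;> simp_all

theorem flatMap_enumerate_snd {α β : Type} (xs : List α) (s : Int) (g : α → List β) :
    (PySem.List.enumerate xs s).flatMap (fun p => g p.2) = xs.flatMap g := by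
  induction xs generalizing s with
  | nil => simp [PySem.List.enumerate_nil]
  | cons x t ih => simp [PySem.List.enumerate_cons, ih]

theorem A_normal (n : Int) :
    get_adjacent_pairs n =
      (get_all_transpositions n).flatMap (fun t1 =>
        ((get_all_transpositions n).filter (fun t2 => are_adjacent t1 t2)).map (fun t2 => (t1, t2))) := by
  unfold get_adjacent_pairs
  simp only [PySem.List.foldl_append_ite, PySem.List.foldl_append_eq_flatMap, List.nil_append]
  have key : ∀ p ∈ PySem.List.enumerate (get_all_transpositions n) 0,
      ((PySem.List.enumerate (get_all_transpositions n) 0).filter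
          (fun q => decide (p.1 ≠ q.1 ∧ are_adjacent p.2 q.2 = true))).map (fun q => (p.2, q.2))
        = ((get_all_transpositions n).filter (fun t2 => are_adjacent p.2 t2)).map (fun t2 => (p.2, t2)) := by
    intro p hp
    rw [← enumerate_filter_map (get_all_transpositions n) 0 (fun t2 => are_adjacent p.2 t2) (fun t2 => (p.2, t2))]
    refine congrArg _ (List.filter_congr fun q hq => ?_)
    obtain ⟨k, hk, rfl⟩ := (PySem.List.mem_enumerate_iff _ _ _).1 hp
    obtain ⟨m, hm, rfl⟩ := (PySem.List.mem_enumerate_iff _ _ _).1 hq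
    by_cases hij : k = m
    · subst hij
      simp [adj_self (t := (get_all_transpositions n)[k]) (by
        have := mem_transpositions (n := n) (t := (get_all_transpositions n)[k]) (List.getElem_mem hk)
        omega)]
    · simp [hij]
  rw [List.flatMap_congr key]
  exact flatMap_enumerate_snd (get_all_transpositions n) 0
    (fun t1 => ((get_all_transpositions n).filter (fun t2 => are_adjacent t1 t2)).map (fun t2 => (t1, t2)))

theorem seg_eq (n a b : Int) (ha : 0 ≤ a) (hab : a < b) (hbn : b < n) :
    ((get_all_transpositions n).filter (fun t2 => are_adjacent (a, b) t2)).map (fun t2 => ((a, b), t2)) = adjSeg n a b := by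
  unfold get_all_transpositions
  rw [List.filter_flatMap, List.map_flatMap]
  simp only [List.filter_map, List.map_map]
  rw [PySem.List.pyRange_one_append 0 a n ha (by omega),
      PySem.List.pyRange_one_cons (show a < n by omega),
      PySem.List.pyRange_one_append (a + 1) b n (by omega) (by omega),
      PySem.List.pyRange_one_cons (show b < n by omega)]
  simp only [List.flatMap_append, List.flatMap_cons, Function.comp_def]
  have h_lt : ∀ x : Int, x < a →
      (PySem.List.pyRange (x + 1) n 1).filter (fun y => are_adjacent (a, b) (x, y)) = [a, b] := by
    intro x hx
    rw [PySem.List.pyRange_one_append (x + 1) a n (by omega) (by omega),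
        PySem.List.pyRange_one_cons (show a < n by omega),
        PySem.List.pyRange_one_append (a + 1) b n (by omega) (by omega),
        PySem.List.pyRange_one_cons (show b < n by omega)]
    simp only [List.filter_append, List.filter_cons]
    have e1 : (PySem.List.pyRange (x + 1) a 1).filter (fun y => are_adjacent (a, b) (x, y)) = [] :=
      List.filter_eq_nil_iff.mpr (fun y hy => fun h => by
        have hy' := PySem.List.mem_pyRange_one.1 hy
        have := (adj_iff' a b x y (by omega) (by omega)).1 h; omega)
    have e2 : (PySem.List.pyRange (a + 1) b 1).filter (fun y => are_adjacent (a, b) (x, y)) = [] :=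
      List.filter_eq_nil_iff.mpr (fun y hy => fun h => by
        have hy' := PySem.List.mem_pyRange_one.1 hy
        have := (adj_iff' a b x y (by omega) (by omega)).1 h; omega)
    have e3 : (PySem.List.pyRange (b + 1) n 1).filter (fun y => are_adjacent (a, b) (x, y)) = [] :=
      List.filter_eq_nil_iff.mpr (fun y hy => fun h => by
        have hy' := PySem.List.mem_pyRange_one.1 hy
        have := (adj_iff' a b x y (by omega) (by omega)).1 h; omega)
    have ca : are_adjacent (a, b) (x, a) = true := (adj_iff' a b x a (by omega) (by omega)).2 (by omega)
    have cb : are_adjacent (a, b) (x, b) = true := (adj_iff' a b x b (by omega) (by omega)).2 (by omega)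
    simp [e1, e2, e3, ca, cb]
  have h_eq_a : (PySem.List.pyRange (a + 1) n 1).filter (fun y => are_adjacent (a, b) (a, y)) =
      (PySem.List.pyRange (a + 1) n 1).filter (fun y => decide (y ≠ b)) := by
    refine List.filter_congr (fun y hy => ?_)
    have hy' := PySem.List.mem_pyRange_one.1 hy
    by_cases hyb : y = b
    · subst hyb
      rw [adj_self (t := (a, y)) (by omega)]; simp
    · rw [(adj_iff' a b a y (by omega) (by omega)).2 (by omega)]
      simp [hyb]
  have h_mid : ∀ x : Int, a < x → x < b →
      (PySem.List.pyRange (x + 1) n 1).filter (fun y => are_adjacent (a, b) (x, y)) = [b] := by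
    intro x hx1 hx2
    rw [PySem.List.pyRange_one_append (x + 1) b n (by omega) (by omega),
        PySem.List.pyRange_one_cons (show b < n by omega)]
    simp only [List.filter_append, List.filter_cons]
    have e1 : (PySem.List.pyRange (x + 1) b 1).filter (fun y => are_adjacent (a, b) (x, y)) = [] :=
      List.filter_eq_nil_iff.mpr (fun y hy => fun h => by
        have hy' := PySem.List.mem_pyRange_one.1 hy
        have := (adj_iff' a b x y (by omega) (by omega)).1 h; omega)
    have e2 : (PySem.List.pyRange (b + 1) n 1).filter (fun y => are_adjacent (a, b) (x, y)) = [] :=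
      List.filter_eq_nil_iff.mpr (fun y hy => fun h => by
        have hy' := PySem.List.mem_pyRange_one.1 hy
        have := (adj_iff' a b x y (by omega) (by omega)).1 h; omega)
    have cb : are_adjacent (a, b) (x, b) = true := (adj_iff' a b x b (by omega) (by omega)).2 (by omega)
    simp [e1, e2, cb]
  have h_eq_b : (PySem.List.pyRange (b + 1) n 1).filter (fun y => are_adjacent (a, b) (b, y)) =
      PySem.List.pyRange (b + 1) n 1 := by
    refine List.filter_eq_self.mpr (fun y hy => ?_)
    have hy' := PySem.List.mem_pyRange_one.1 hy
    exact (adj_iff' a b b y (by omega) (by omega)).2 (by omega)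
  have h_gt : ∀ x : Int, b < x →
      (PySem.List.pyRange (x + 1) n 1).filter (fun y => are_adjacent (a, b) (x, y)) = [] := by
    intro x hx
    refine List.filter_eq_nil_iff.mpr (fun y hy => fun h => ?_)
    have hy' := PySem.List.mem_pyRange_one.1 hy
    have := (adj_iff' a b x y (by omega) (by omega)).1 h; omega
  have c1 : ∀ x ∈ PySem.List.pyRange 0 a 1,
      ((PySem.List.pyRange (x + 1) n 1).filter (fun y => are_adjacent (a, b) (x, y))).map
          (fun y => ((a, b), (x, y))) = [((a, b), (x, a)), ((a, b), (x, b))] := by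
    intro x hx
    rw [h_lt x (PySem.List.mem_pyRange_one.1 hx).2]; rfl
  have c3 : ∀ x ∈ PySem.List.pyRange (a + 1) b 1,
      ((PySem.List.pyRange (x + 1) n 1).filter (fun y => are_adjacent (a, b) (x, y))).map
          (fun y => ((a, b), (x, y))) = [((a, b), (x, b))] := by
    intro x hx
    have := PySem.List.mem_pyRange_one.1 hx
    rw [h_mid x (by omega) (by omega)]; rfl
  have c5 : ∀ x ∈ PySem.List.pyRange (b + 1) n 1,
      ((PySem.List.pyRange (x + 1) n 1).filter (fun y => are_adjacent (a, b) (x, y))).map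
          (fun y => ((a, b), (x, y))) = ([] : List ((Int × Int) × (Int × Int))) := by
    intro x hx
    have := PySem.List.mem_pyRange_one.1 hx
    rw [h_gt x (by omega)]; rfl
  rw [List.flatMap_congr c1, List.flatMap_congr c3, List.flatMap_congr c5, h_eq_a, h_eq_b]
  simp [adjSeg, List.map_eq_flatMap]

-- ===== VERDICT (by name: the statement is the Claim_ definition above) =====
theorem get_adjacent_pairs_spec : Claim_equal_get_adjacent_pairs := by
  intro n _
  unfold Spec_get_adjacent_pairs
  rw [A_normal, B_normal]
  unfold get_all_transpositions
  rw [List.flatMap_assoc]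
  refine List.flatMap_congr (fun a ha => ?_)
  rw [List.flatMap_map]
  refine List.flatMap_congr (fun b hb => ?_)
  have ha' := (PySem.List.mem_pyRange_one).1 ha
  have hb' := (PySem.List.mem_pyRange_one).1 hb
  exact seg_eq n a b (by omega) (by omega) (by omega)
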